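-- pv_equiv track=rewrite | github.com/kristovatlas/rfc | bips/li01_examples.py | bytearr_cmp
-- ===== SOURCE A (Python) =====
-- def bytearr_cmp(barr1, barr2):
-- 	pos = 0
-- 	while (pos < len(barr1) and pos < len(barr2)):
-- 		if (barr1[pos] < barr2[pos]):
-- 			return -1;
-- 		elif (barr1[pos] > barr2[pos]):
-- 			return 1;
-- 		pos = pos + 1
-- 	#the shorter array will be ordered first
-- 	if (len(barr1) < len(barr2)):
-- 		return -1
-- 	elif (len(barr1) > len(barr2)):
-- 		return 1
-- 	else:
-- 		return 0
-- ===== SOURCE B (Python) =====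
-- def bytearr_cmp(barr1, barr2):
--     return (barr1 > barr2) - (barr1 < barr2)
-- ===== Notes on version B (the rewrite author's own statement) =====
-- stated objective: idiomatic
-- what changed: Replaces the explicit index loop and branch chain by the closed-form three-way comparison (barr1 > barr2) - (barr1 < barr2), delegating element-wise-then-length lexicographic ordering to Python's built-in sequence comparison.
import Mathlib
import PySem

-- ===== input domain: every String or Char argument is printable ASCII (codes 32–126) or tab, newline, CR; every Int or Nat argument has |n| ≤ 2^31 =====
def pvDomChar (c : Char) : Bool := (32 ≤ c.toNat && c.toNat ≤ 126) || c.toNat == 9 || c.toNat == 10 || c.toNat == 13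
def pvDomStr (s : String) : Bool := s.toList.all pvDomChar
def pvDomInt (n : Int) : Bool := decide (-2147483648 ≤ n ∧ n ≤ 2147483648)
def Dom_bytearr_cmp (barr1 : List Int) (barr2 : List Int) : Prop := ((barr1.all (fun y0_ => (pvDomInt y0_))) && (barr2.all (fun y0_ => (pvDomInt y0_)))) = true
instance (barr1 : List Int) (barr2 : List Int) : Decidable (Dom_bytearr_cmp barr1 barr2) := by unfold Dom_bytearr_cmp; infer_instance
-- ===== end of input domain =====

-- B replaces A's index loop and branch chain by the closed-form (barr1 > barr2) - (barr1 < barr2) via Python's built-in lexicographic list comparison (idiomatic; same cost).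

-- ===== PORT A =====
-- A's while loop over pos: each step compares the heads (the equal prefix consumed so far
-- plays no further role), then the trailing length comparison on what remains.
def bytearrCmpLoop : List Int → List Int → Int
  | x :: xs, y :: ys =>
    if x < y then -1
    else if x > y then 1
    else bytearrCmpLoop xs ys
  | xs, ys =>
    if xs.length < ys.length then -1
    else if xs.length > ys.length then 1
    else 0

def bytearr_cmp (barr1 : List Int) (barr2 : List Int) : Int :=
  bytearrCmpLoop barr1 barr2

-- ===== PORT B =====
-- Python's built-in lexicographic '<' on lists of ints.
def pyListLt : List Int → List Int → Bool
  | _, [] => false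
  | [], _ :: _ => true
  | x :: xs, y :: ys =>
    if x < y then true
    else if y < x then false
    else pyListLt xs ys

def bytearr_cmp_alt (barr1 : List Int) (barr2 : List Int) : Int :=
  (if pyListLt barr2 barr1 then (1 : Int) else 0) - (if pyListLt barr1 barr2 then (1 : Int) else 0)

-- ===== PRECONDITION & SPEC =====
def Spec_bytearr_cmp (barr1 : List Int) (barr2 : List Int) (out : Int) : Prop := out = bytearr_cmp_alt barr1 barr2
instance (barr1 : List Int) (barr2 : List Int) (out : Int) : Decidable (Spec_bytearr_cmp barr1 barr2 out) := by unfold Spec_bytearr_cmp; infer_instance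

-- ===== CLAIM (what is proved, stated in full; the proofs are below) =====
def Claim_equal_bytearr_cmp : Prop := ∀ (barr1 : List Int) (barr2 : List Int), Dom_bytearr_cmp barr1 barr2 → Spec_bytearr_cmp barr1 barr2 (bytearr_cmp barr1 barr2)

-- ===== LEMMAS AND PROOFS =====

-- ===== VERDICT (by name: the statement is the Claim_ definition above) =====
theorem loop_eq_alt : ∀ (xs ys : List Int), bytearrCmpLoop xs ys =
    (if pyListLt ys xs then (1 : Int) else 0) - (if pyListLt xs ys then (1 : Int) else 0)
  | [], [] => by simp [bytearrCmpLoop, pyListLt]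
  | [], _ :: _ => by simp [bytearrCmpLoop, pyListLt]
  | _ :: _, [] => by simp [bytearrCmpLoop, pyListLt]
  | x :: xs, y :: ys => by
    have ih := loop_eq_alt xs ys
    simp only [bytearrCmpLoop, pyListLt]
    by_cases h1 : x < y
    · simp [h1, not_lt.mpr (le_of_lt h1)]
    · by_cases h2 : y < x
      · simp [h1, h2]
      · simp [h1, h2, ih]

theorem bytearr_cmp_spec : Claim_equal_bytearr_cmp := by
  intro b1 b2 _
  unfold Spec_bytearr_cmp bytearr_cmp bytearr_cmp_alt
  exact loop_eq_alt b1 b2
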